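-- pv_equiv track=rewrite | github.com/MatthewBeddows/KnowledgeGraph | variable_ontology.py | _units_compatible
-- ===== SOURCE A (Python) =====
-- from typing import Dict, List, Optional, Tuple
--
-- def _units_compatible(unit1: Optional[str], unit2: Optional[str]) -> bool:
--     """Check if two units are compatible"""
--     if not unit1 or not unit2:
--         return False
--
--     unit_families = [
--         ['celsius', 'c', 'fahrenheit', 'f', 'kelvin', 'k'],
--         ['mm', 'inch', 'in', 'cm'],
--         ['%', 'percent', 'pct'],
--         ['kg/ha', 'ton/ha', 'bu/acre'],
--         ['ppm', 'mg/kg', 'mg/l']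
--     ]
--
--     unit1_lower = unit1.lower()
--     unit2_lower = unit2.lower()
--
--     for family in unit_families:
--         if any(u in unit1_lower for u in family) and any(u in unit2_lower for u in family):
--             return True
--
--     return unit1_lower == unit2_lower
-- ===== SOURCE B (Python) =====
-- def _units_compatible(unit1, unit2):
--     """Check if two units are compatible"""
--     if not unit1 or not unit2:
--         return False
--
--     unit_families = [
--         ['celsius', 'c', 'fahrenheit', 'f', 'kelvin', 'k'],
--         ['mm', 'inch', 'in', 'cm'],
--         ['%', 'percent', 'pct'],
--         ['kg/ha', 'ton/ha', 'bu/acre'],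
--         ['ppm', 'mg/kg', 'mg/l']
--     ]
--     # flat multi-pattern index: (token, family id) pairs
--     tokens = [(tok, fam) for fam, family in enumerate(unit_families) for tok in family]
--
--     def family_mask(s):
--         # single left-to-right scan of s: at each position try every token,
--         # accumulating the matched family ids as bits of an integer mask
--         mask = 0
--         for i in range(len(s)):
--             for tok, fam in tokens:
--                 if s.startswith(tok, i):
--                     mask |= 1 << fam
--         return mask
--
--     u1 = unit1.lower()
--     u2 = unit2.lower()
--     if family_mask(u1) & family_mask(u2):
--         return True
--     return u1 == u2
-- ===== Notes on version B (the rewrite author's own statement) =====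
-- stated objective: alternative
-- what changed: B flattens the families into one (token, family-id) multi-pattern index and computes, per string, a family bitmask by a single left-to-right scan over string positions with startswith(tok, i), then tests whether the two integer masks share a bit; A instead loops over families and runs per-token substring searches on both strings together with early exit.
import Mathlib
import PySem

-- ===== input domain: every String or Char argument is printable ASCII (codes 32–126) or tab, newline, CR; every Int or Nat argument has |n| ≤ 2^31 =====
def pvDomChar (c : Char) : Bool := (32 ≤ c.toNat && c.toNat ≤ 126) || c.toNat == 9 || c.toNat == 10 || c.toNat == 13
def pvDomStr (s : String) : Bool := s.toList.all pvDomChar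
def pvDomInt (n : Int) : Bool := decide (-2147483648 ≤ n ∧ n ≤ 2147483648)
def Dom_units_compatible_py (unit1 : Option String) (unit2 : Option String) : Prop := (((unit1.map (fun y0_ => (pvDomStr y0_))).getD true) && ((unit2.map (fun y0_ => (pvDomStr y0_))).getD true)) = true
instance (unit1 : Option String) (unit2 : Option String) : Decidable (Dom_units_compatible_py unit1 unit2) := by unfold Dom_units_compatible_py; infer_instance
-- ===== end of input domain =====

-- B replaces A's per-family loop of substring tests by a flat (token, family-id) index and a
-- single positional scan of each string that accumulates a family bitmask; objective: alternative algorithm.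

-- ===== PORT A =====
-- the 'for family in unit_families' loop of A, returning at the first match, else the equality fallback
def pvCheckFamilies (l1 l2 : String) : List (List String) → Bool
  | [] => l1 == l2
  | f :: rest =>
    if (f.any fun u => PySem.Str.isIn u l1) && (f.any fun u => PySem.Str.isIn u l2) then true
    else pvCheckFamilies l1 l2 rest

def units_compatible_py (unit1 : Option String) (unit2 : Option String) : Bool :=
  match unit1, unit2 with
  | some s1, some s2 =>
    if s1 == "" || s2 == "" then false
    else pvCheckFamilies (PySem.Str.lower s1) (PySem.Str.lower s2)
      [["celsius", "c", "fahrenheit", "f", "kelvin", "k"],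
       ["mm", "inch", "in", "cm"],
       ["%", "percent", "pct"],
       ["kg/ha", "ton/ha", "bu/acre"],
       ["ppm", "mg/kg", "mg/l"]]
  | _, _ => false

-- ===== PORT B =====
-- tokens = [(tok, fam) for fam, family in enumerate(unit_families) for tok in family]
-- (fam is a nonnegative Python int used only as a shift amount, represented as Nat)
def pvTokens : List (String × Nat) :=
  (List.zip (List.range 5)
    [["celsius", "c", "fahrenheit", "f", "kelvin", "k"],
     ["mm", "inch", "in", "cm"],
     ["%", "percent", "pct"],
     ["kg/ha", "ton/ha", "bu/acre"],
     ["ppm", "mg/kg", "mg/l"]]).flatMap fun p => p.2.map fun tok => (tok, p.1)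

-- family_mask(s): mask |= 1 << fam whenever s.startswith(tok, i).
-- s.startswith(tok, i) for 0 <= i is exactly tok.toList.isPrefixOf (s.drop i) (exact hand port);
-- the mask is a nonnegative Python int, represented as Nat.
def pvFamilyMask (s : List Char) : Nat :=
  (List.range s.length).foldl
    (fun mask i => pvTokens.foldl
      (fun mask p => if p.1.toList.isPrefixOf (s.drop i) then mask ||| (1 <<< p.2) else mask)
      mask)
    0

def units_compatible_py_alt (unit1 : Option String) (unit2 : Option String) : Bool :=
  -- 'not unit1 or not unit2' is true exactly when the option is none or the string is empty
  let s1 := unit1.getD ""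
  let s2 := unit2.getD ""
  if s1 == "" || s2 == "" then false
  else
    let l1 := PySem.Str.lower s1
    let l2 := PySem.Str.lower s2
    if (pvFamilyMask l1.toList &&& pvFamilyMask l2.toList) != 0 then true
    else l1 == l2

-- ===== PRECONDITION & SPEC =====
def Spec_units_compatible_py (unit1 : Option String) (unit2 : Option String) (out : Bool) : Prop := out = units_compatible_py_alt unit1 unit2
instance (unit1 : Option String) (unit2 : Option String) (out : Bool) : Decidable (Spec_units_compatible_py unit1 unit2 out) := by unfold Spec_units_compatible_py; infer_instance

-- ===== CLAIM (what is proved, stated in full; the proofs are below) =====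
def Claim_equal_units_compatible_py : Prop := ∀ (unit1 : Option String) (unit2 : Option String), Dom_units_compatible_py unit1 unit2 → Spec_units_compatible_py unit1 unit2 (units_compatible_py unit1 unit2)

-- ===== LEMMAS AND PROOFS =====

-- bit f of the inner token fold
lemma pv_testBit_inner (toks : List (String × Nat)) (s : List Char) (i : Nat) (m f : Nat) :
    ((toks.foldl
      (fun mask p => if p.1.toList.isPrefixOf (s.drop i) then mask ||| (1 <<< p.2) else mask)
      m).testBit f)
    = (m.testBit f || toks.any fun p => p.1.toList.isPrefixOf (s.drop i) && (p.2 == f)) := by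
  induction toks generalizing m with
  | nil => simp
  | cons p rest ih =>
    simp only [List.foldl_cons, List.any_cons]
    rw [ih]
    by_cases hc : p.1.toList.isPrefixOf (s.drop i) = true
    · rw [if_pos hc, hc]
      have hbf : (p.2 == f) = decide (p.2 = f) := by
        by_cases h2 : p.2 = f <;> simp [h2]
      simp only [Nat.testBit_or, Nat.one_shiftLeft, Nat.testBit_two_pow, Bool.or_assoc,
        Bool.true_and, hbf]
    · rw [if_neg hc]
      rw [Bool.not_eq_true] at hc
      simp [hc]

-- bit f of the whole positional scan
lemma pv_testBit_outer (L : List Nat) (s : List Char) (m f : Nat) :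
    ((L.foldl
      (fun mask i => pvTokens.foldl
        (fun mask p => if p.1.toList.isPrefixOf (s.drop i) then mask ||| (1 <<< p.2) else mask)
        mask)
      m).testBit f)
    = (m.testBit f || L.any fun i => pvTokens.any fun p => p.1.toList.isPrefixOf (s.drop i) && (p.2 == f)) := by
  induction L generalizing m with
  | nil => simp
  | cons i rest ih =>
    simp only [List.foldl_cons, List.any_cons, ih, pv_testBit_inner, Bool.or_assoc]

lemma pv_any_or {α : Type} (l : List α) (p q : α → Bool) :
    (l.any fun x => p x || q x) = (l.any p || l.any q) := by
  induction l with
  | nil => simp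
  | cons a t ih =>
    simp only [List.any_cons, ih]
    cases p a <;> cases q a <;> simp

lemma pv_any_and_const {α : Type} (l : List α) (p : α → Bool) (c : Bool) :
    (l.any fun x => p x && c) = (l.any p && c) := by
  induction l with
  | nil => simp
  | cons a t ih =>
    simp only [List.any_cons, ih]
    cases c <;> simp

lemma pv_testBit_if (a : Bool) (k f : Nat) :
    ((if a then 2^k else 0 : Nat).testBit f) = (a && (k == f)) := by
  cases a
  · simp
  · simp only [if_true, Bool.true_and, Nat.testBit_two_pow]
    by_cases h : k = f <;> simp [h]

-- a nonempty token occurs at some scan position iff it is a substring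
lemma pv_scan_token (s tok : List Char) (h : tok ≠ []) :
    ((List.range s.length).any fun i => tok.isPrefixOf (s.drop i)) = PySem.Chars.isIn tok s := by
  rw [Bool.eq_iff_iff]
  simp only [List.any_eq_true, List.mem_range, List.isPrefixOf_iff_prefix]
  rw [← PySem.Chars.exists_prefix_drop_iff_isIn]
  constructor
  · rintro ⟨i, _, hp⟩; exact ⟨i, hp⟩
  · rintro ⟨j, hp⟩
    by_cases hj : j < s.length
    · exact ⟨j, hj, hp⟩
    · exfalso
      rw [List.drop_eq_nil_of_le (le_of_not_gt hj)] at hp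
      exact h (List.prefix_nil.mp hp)

-- the scan's mask, characterised family by family
lemma pv_mask_eq (s : String) :
    pvFamilyMask s.toList =
      ((if (["celsius", "c", "fahrenheit", "f", "kelvin", "k"].any fun u => PySem.Str.isIn u s) then 2^0 else 0)
      ||| (if (["mm", "inch", "in", "cm"].any fun u => PySem.Str.isIn u s) then 2^1 else 0)
      ||| (if (["%", "percent", "pct"].any fun u => PySem.Str.isIn u s) then 2^2 else 0)
      ||| (if (["kg/ha", "ton/ha", "bu/acre"].any fun u => PySem.Str.isIn u s) then 2^3 else 0)
      ||| (if (["ppm", "mg/kg", "mg/l"].any fun u => PySem.Str.isIn u s) then 2^4 else 0)) := by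
  apply Nat.eq_of_testBit_eq
  intro f
  unfold pvFamilyMask
  rw [pv_testBit_outer]
  have ht : pvTokens =
    [("celsius", 0), ("c", 0), ("fahrenheit", 0), ("f", 0), ("kelvin", 0), ("k", 0),
     ("mm", 1), ("inch", 1), ("in", 1), ("cm", 1),
     ("%", 2), ("percent", 2), ("pct", 2),
     ("kg/ha", 3), ("ton/ha", 3), ("bu/acre", 3),
     ("ppm", 4), ("mg/kg", 4), ("mg/l", 4)] := by rfl
  rw [ht]
  simp only [Nat.zero_testBit, Bool.false_or, Nat.testBit_or, pv_testBit_if,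
    List.any_cons, List.any_nil, Bool.or_false, pv_any_or, pv_any_and_const,
    PySem.Str.isIn_eq]
  repeat rw [pv_scan_token _ _ (by decide)]
  simp only [Bool.and_or_distrib_right, Bool.or_assoc]

lemma pv_core (l1 l2 : String) :
    pvCheckFamilies l1 l2 [["celsius", "c", "fahrenheit", "f", "kelvin", "k"],
       ["mm", "inch", "in", "cm"],
       ["%", "percent", "pct"],
       ["kg/ha", "ton/ha", "bu/acre"],
       ["ppm", "mg/kg", "mg/l"]] =
      (if (pvFamilyMask l1.toList &&& pvFamilyMask l2.toList) != 0 then true else l1 == l2) := by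
  rw [pv_mask_eq l1, pv_mask_eq l2]
  simp only [pvCheckFamilies]
  generalize (["celsius", "c", "fahrenheit", "f", "kelvin", "k"].any fun u => PySem.Str.isIn u l1) = a1
  generalize (["mm", "inch", "in", "cm"].any fun u => PySem.Str.isIn u l1) = a2
  generalize (["%", "percent", "pct"].any fun u => PySem.Str.isIn u l1) = a3
  generalize (["kg/ha", "ton/ha", "bu/acre"].any fun u => PySem.Str.isIn u l1) = a4
  generalize (["ppm", "mg/kg", "mg/l"].any fun u => PySem.Str.isIn u l1) = a5
  generalize (["celsius", "c", "fahrenheit", "f", "kelvin", "k"].any fun u => PySem.Str.isIn u l2) = b1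
  generalize (["mm", "inch", "in", "cm"].any fun u => PySem.Str.isIn u l2) = b2
  generalize (["%", "percent", "pct"].any fun u => PySem.Str.isIn u l2) = b3
  generalize (["kg/ha", "ton/ha", "bu/acre"].any fun u => PySem.Str.isIn u l2) = b4
  generalize (["ppm", "mg/kg", "mg/l"].any fun u => PySem.Str.isIn u l2) = b5
  generalize (l1 == l2) = e
  revert a1 a2 a3 a4 a5 b1 b2 b3 b4 b5 e
  decide

-- ===== VERDICT (by name: the statement is the Claim_ definition above) =====
theorem units_compatible_py_spec : Claim_equal_units_compatible_py := by
  intro unit1 unit2 _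
  unfold Spec_units_compatible_py units_compatible_py units_compatible_py_alt
  cases unit1 with
  | none => simp
  | some s1 =>
    cases unit2 with
    | none => simp
    | some s2 =>
      simp only [Option.getD_some]
      by_cases h : (s1 == "" || s2 == "") = true
      · simp [h]
      · simp only [Bool.not_eq_true] at h
        simp only [h, if_false, Bool.false_eq_true]
        exact pv_core _ _
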